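-- pv_equiv track=rewrite | github.com/mann1x/cross-tokenizer-distill | experiments/validation/06_eval.py | truncate_at_function_end
-- ===== SOURCE A (Python) =====
-- _HE_STOPS = ("\nclass ", "\ndef ", "\n#", "\nif __name__", "\nprint(", "\nassert ", "\n```")
--
-- def truncate_at_function_end(s: str) -> str:
--     """Keep the (possibly leading) def + body — cut at next top-level marker."""
--     start = 0
--     stripped = s.lstrip("\n ")
--     if stripped.startswith(("def ", "class ")):
--         leading_offset = len(s) - len(stripped)
--         nl = s.find("\n", leading_offset)
--         start = nl + 1 if nl != -1 else len(s)
--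
--     earliest = len(s)
--     for stop in _HE_STOPS:
--         i = s.find(stop, start)
--         if i != -1 and i < earliest:
--             earliest = i
--     return s[:earliest]
-- ===== SOURCE B (Python) =====
-- _HE_TAILS = ("class ", "def ", "#", "if __name__", "print(", "assert ", "```")
--
--
-- def truncate_at_function_end(s: str) -> str:
--     """Keep the (possibly leading) def + body — cut at next top-level marker."""
--     t = s.lstrip("\n ")
--     if t[:4] == "def " or t[:6] == "class ":
--         nl = s.find("\n", len(s) - len(t))
--         if nl == -1:
--             return s
--         pos = nl + 1
--     else:
--         pos = 0
--     while True:
--         i = s.find("\n", pos)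
--         if i == -1:
--             return s
--         if s.startswith(_HE_TAILS, i + 1):
--             return s[:i]
--         pos = i + 1
-- ===== Notes on version B (the rewrite author's own statement) =====
-- stated objective: alternative
-- what changed: A's seven whole-string s.find(stop, start) scans with a running minimum are replaced by a single forward walk over newline positions (repeated find of the newline character) that, at each newline, tests the marker tails with one tuple str.startswith at the following position and cuts at the first hit.
import Mathlib
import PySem

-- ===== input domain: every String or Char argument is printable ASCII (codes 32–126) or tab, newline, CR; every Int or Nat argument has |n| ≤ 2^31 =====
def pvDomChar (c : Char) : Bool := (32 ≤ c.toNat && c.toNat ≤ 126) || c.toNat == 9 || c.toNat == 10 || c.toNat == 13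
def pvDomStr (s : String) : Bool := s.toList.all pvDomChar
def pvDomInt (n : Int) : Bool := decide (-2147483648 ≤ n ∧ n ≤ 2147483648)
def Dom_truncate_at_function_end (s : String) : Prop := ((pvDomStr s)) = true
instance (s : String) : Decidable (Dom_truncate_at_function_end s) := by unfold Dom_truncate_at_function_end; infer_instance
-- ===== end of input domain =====

-- B replaces A's seven whole-string s.find(stop, start) scans and running minimum by one walk
-- over newline positions (repeated s.find('\n', pos)) testing the marker tails after each newline
-- (alternative decomposition, single forward scan).

-- ===== PORT A =====
def heStops : List (List Char) :=
  ["\nclass ".toList, "\ndef ".toList, "\n#".toList, "\nif __name__".toList,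
   "\nprint(".toList, "\nassert ".toList, "\n```".toList]

-- s.lstrip("\n ") ported by hand: drop leading chars from the set {'\n',' '} (exact for str.lstrip(chars))
def lstripNlSp (cs : List Char) : List Char := cs.dropWhile (fun c => c == '\n' || c == ' ')

-- A's 'start' computation: offset past a leading def/class line
def bodyStart (cs : List Char) : Int :=
  if PySem.Chars.startswith (lstripNlSp cs) "def ".toList ||
     PySem.Chars.startswith (lstripNlSp cs) "class ".toList then
    if PySem.Chars.findFrom cs ['\n'] ((cs.length : Int) - ((lstripNlSp cs).length : Int)) ≠ -1 then
      PySem.Chars.findFrom cs ['\n'] ((cs.length : Int) - ((lstripNlSp cs).length : Int)) + 1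
    else (cs.length : Int)
  else 0

def truncate_at_function_end (s : String) : String :=
  let cs := s.toList
  let start := bodyStart cs
  let earliest := heStops.foldl (fun e stop =>
      let i := PySem.Chars.findFrom cs stop start
      if i ≠ -1 ∧ i < e then i else e) ((cs.length : Int))
  String.ofList (PySem.List.slice cs none (some earliest))

-- ===== PORT B =====
-- the marker tails: each _HE_STOPS entry minus its leading newline
def heTails : List (List Char) :=
  ["class ".toList, "def ".toList, "#".toList, "if __name__".toList,
   "print(".toList, "assert ".toList, "```".toList]

-- Source B's while-loop: hop from newline to newline via s.find('\n', pos); at a newline whose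
-- successor position starts with a marker tail return s[:i]; the fuel argument (len(s)+1 at the
-- call site) only makes the recursion total — pos strictly increases, so it is never exhausted.
def nlScan (cs : List Char) (pos : Int) : Nat → List Char
  | 0 => []
  | fuel + 1 =>
    let i := PySem.Chars.findFrom cs ['\n'] pos
    if i = -1 then cs
    else if heTails.any (fun t => PySem.Chars.startswith (cs.drop (i.toNat + 1)) t) then
      cs.take i.toNat
    else nlScan cs (i + 1) fuel

def truncate_at_function_end_alt (s : String) : String :=
  let cs := s.toList
  let t := cs.dropWhile (fun c => c == '\n' || c == ' ')
  if t.take 4 = "def ".toList ∨ t.take 6 = "class ".toList then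
    let nl := PySem.Chars.findFrom cs ['\n'] ((cs.length : Int) - (t.length : Int))
    if nl = -1 then s
    else String.ofList (nlScan cs (nl + 1) (cs.length + 1))
  else String.ofList (nlScan cs 0 (cs.length + 1))

-- ===== PRECONDITION & SPEC =====
def Spec_truncate_at_function_end (s : String) (out : String) : Prop := out = truncate_at_function_end_alt s
instance (s : String) (out : String) : Decidable (Spec_truncate_at_function_end s out) := by unfold Spec_truncate_at_function_end; infer_instance

-- ===== CLAIM =====
def Claim_equal_truncate_at_function_end : Prop := ∀ (s : String), Dom_truncate_at_function_end s → Spec_truncate_at_function_end s (truncate_at_function_end s)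

-- ===== LEMMAS AND PROOFS =====

-- the step of A's minimum-taking fold (zeta-reduced form of the port's lambda)
def fstep (cs : List Char) (start : Int) (e : Int) (stop : List Char) : Int :=
  if PySem.Chars.findFrom cs stop start ≠ -1 ∧ PySem.Chars.findFrom cs stop start < e then
    PySem.Chars.findFrom cs stop start
  else e

lemma fstep_eq_pos {cs stop : List Char} {start e : Int}
    (h : PySem.Chars.findFrom cs stop start ≠ -1 ∧ PySem.Chars.findFrom cs stop start < e) :
    fstep cs start e stop = PySem.Chars.findFrom cs stop start := by
  unfold fstep; rw [if_pos h]

lemma fstep_eq_neg {cs stop : List Char} {start e : Int}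
    (h : ¬ (PySem.Chars.findFrom cs stop start ≠ -1 ∧ PySem.Chars.findFrom cs stop start < e)) :
    fstep cs start e stop = e := by
  unfold fstep; rw [if_neg h]

lemma fold_le (cs : List Char) (start : Int) :
    ∀ (l : List (List Char)) (e : Int), l.foldl (fstep cs start) e ≤ e := by
  intro l
  induction l with
  | nil => intro e; simp
  | cons q qs ih =>
    intro e
    rw [List.foldl_cons]
    refine le_trans (ih _) ?_
    unfold fstep
    split
    · rename_i h; exact le_of_lt h.2
    · exact le_refl e

def matchAt (cs : List Char) (k : Nat) : Prop := ∃ p ∈ heStops, p <+: cs.drop k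

lemma stops_ne_nil : ∀ p ∈ heStops, p ≠ [] := by decide

lemma prefix_drop_lt {p cs : List Char} {k : Nat} (h : p <+: cs.drop k) (hne : p ≠ []) :
    k < cs.length := by
  have h1 : p.length ≤ (cs.drop k).length := h.length_le
  have h2 : 0 < p.length := List.length_pos_iff.mpr hne
  simp [List.length_drop] at h1
  omega

lemma no_infix_no_prefix {p cs : List Char} {m k : Nat} (h : ¬ p <:+: cs.drop m) (hmk : m ≤ k) :
    ¬ p <+: cs.drop k := by
  intro hp
  apply h
  have : cs.drop k = (cs.drop m).drop (k - m) := by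
    rw [List.drop_drop]; congr 1; omega
  rw [this] at hp
  exact hp.isInfix.trans (List.drop_suffix _ _).isInfix

lemma find_spec' (cs stop : List Char) (start : Int) (h0 : 0 ≤ start)
    (hn : start ≤ (cs.length : Int)) (hne : stop ≠ []) :
    (PySem.Chars.findFrom cs stop start = -1 →
        ∀ k : Nat, start ≤ (k : Int) → ¬ stop <+: cs.drop k) ∧
    (PySem.Chars.findFrom cs stop start ≠ -1 →
        start ≤ PySem.Chars.findFrom cs stop start ∧
        PySem.Chars.findFrom cs stop start < (cs.length : Int) ∧
        stop <+: cs.drop (PySem.Chars.findFrom cs stop start).toNat ∧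
        ∀ k : Nat, start ≤ (k : Int) → (k : Int) < PySem.Chars.findFrom cs stop start →
          ¬ stop <+: cs.drop k) := by
  have hcast : start = ((start.toNat : Nat) : Int) := (Int.toNat_of_nonneg h0).symm
  have hk : start.toNat ≤ cs.length := by omega
  constructor
  · intro hneg k hks
    rw [hcast] at hneg
    have hni := (PySem.Chars.findFrom_natCast_eq_neg_one_iff cs stop start.toNat hk).mp hneg
    exact no_infix_no_prefix hni (by omega)
  · intro hpos
    rw [hcast] at hpos ⊢
    obtain ⟨hle, hpre, hmin⟩ := PySem.Chars.findFrom_natCast_spec cs stop start.toNat hk hpos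
    have hlt : (PySem.Chars.findFrom cs stop ((start.toNat : Nat) : Int)).toNat < cs.length :=
      prefix_drop_lt hpre hne
    refine ⟨hle, by omega, hpre, ?_⟩
    intro k hks hki
    exact hmin k (by omega) (by omega)

lemma fold_spec (cs : List Char) (start : Int) (h0 : 0 ≤ start) (hn : start ≤ (cs.length : Int)) :
    ∀ (l : List (List Char)), (∀ p ∈ l, p ∈ heStops) → ∀ (e : Int),
    start ≤ e → e ≤ (cs.length : Int) → (e = (cs.length : Int) ∨ matchAt cs e.toNat) →
    start ≤ l.foldl (fstep cs start) e ∧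
    l.foldl (fstep cs start) e ≤ (cs.length : Int) ∧
    (l.foldl (fstep cs start) e = (cs.length : Int) ∨ matchAt cs (l.foldl (fstep cs start) e).toNat) ∧
    (∀ p ∈ l, ∀ k : Nat, start ≤ (k : Int) → (k : Int) < l.foldl (fstep cs start) e →
        ¬ p <+: cs.drop k) := by
  intro l
  induction l with
  | nil =>
    intro _ e h1 h2 h3
    simpa using ⟨h1, h2, h3⟩
  | cons stop rest ih =>
    intro hmem e h1 h2 h3
    have hstopmem : stop ∈ heStops := hmem stop (by simp)
    have hne : stop ≠ [] := stops_ne_nil stop hstopmem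
    obtain ⟨hfneg, hfpos⟩ := find_spec' cs stop start h0 hn hne
    rw [List.foldl_cons]
    by_cases hc : PySem.Chars.findFrom cs stop start ≠ -1 ∧ PySem.Chars.findFrom cs stop start < e
    · rw [fstep_eq_pos hc]
      obtain ⟨his, hil, hipre, himin⟩ := hfpos hc.1
      obtain ⟨g1, g2, g3, g4⟩ := ih (fun p hp => hmem p (by simp [hp]))
        (PySem.Chars.findFrom cs stop start) his (by omega)
        (Or.inr ⟨stop, hstopmem, hipre⟩)
      refine ⟨g1, g2, g3, ?_⟩
      intro p hp k hks hki
      rcases List.mem_cons.mp hp with rfl | hp'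
      · have hres_le := fold_le cs start rest (PySem.Chars.findFrom cs p start)
        exact himin k hks (by omega)
      · exact g4 p hp' k hks hki
    · rw [fstep_eq_neg hc]
      obtain ⟨g1, g2, g3, g4⟩ := ih (fun p hp => hmem p (by simp [hp])) e h1 h2 h3
      refine ⟨g1, g2, g3, ?_⟩
      intro p hp k hks hki
      rcases List.mem_cons.mp hp with rfl | hp'
      · by_cases hi1 : PySem.Chars.findFrom cs p start = -1
        · exact hfneg hi1 k hks
        · have hei : e ≤ PySem.Chars.findFrom cs p start := by
            rcases not_and_or.mp hc with h | h
            · exact absurd hi1 (by simpa using h)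
            · omega
          obtain ⟨_, _, _, himin⟩ := hfpos hi1
          have hres_le := fold_le cs start rest e
          exact himin k hks (by omega)
      · exact g4 p hp' k hks hki

lemma heStops_eq_map : heStops = heTails.map (fun t => '\n' :: t) := by decide

lemma cons_prefix_split {a : Char} {t L : List Char} :
    (a :: t) <+: L ↔ ([a] <+: L ∧ t <+: L.tail) := by
  cases L with
  | nil => simp
  | cons b l => simp [List.cons_prefix_cons]

lemma matchAt_iff (cs : List Char) (k : Nat) :
    matchAt cs k ↔ (['\n'] <+: cs.drop k ∧
      (heTails.any (fun t => PySem.Chars.startswith (cs.drop (k + 1)) t)) = true) := by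
  have htail : (cs.drop k).tail = cs.drop (k + 1) := by
    rw [← List.drop_drop]; simp
  unfold matchAt
  rw [heStops_eq_map]
  simp only [List.any_eq_true, PySem.Chars.startswith_iff, List.mem_map]
  constructor
  · rintro ⟨p, ⟨t, ht, rfl⟩, hpre⟩
    rw [cons_prefix_split] at hpre
    exact ⟨hpre.1, t, ht, htail ▸ hpre.2⟩
  · rintro ⟨hnl, t, ht, hpre⟩
    exact ⟨'\n' :: t, ⟨t, ht, rfl⟩, cons_prefix_split.mpr ⟨hnl, htail ▸ hpre⟩⟩

lemma nlScan_spec (cs : List Char) : ∀ (fuel : Nat) (pos : Int), 0 ≤ pos →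
    pos ≤ (cs.length : Int) → cs.length < fuel + pos.toNat →
    ∃ m : Int, nlScan cs pos fuel = cs.take m.toNat ∧ pos ≤ m ∧ m ≤ (cs.length : Int) ∧
      (m = (cs.length : Int) ∨ matchAt cs m.toNat) ∧
      (∀ k : Nat, pos ≤ (k : Int) → (k : Int) < m → ¬ matchAt cs k) := by
  intro fuel
  induction fuel with
  | zero => intro pos h0 hn hf; omega
  | succ fuel ih =>
    intro pos h0 hn hf
    obtain ⟨hfneg, hfpos⟩ := find_spec' cs ['\n'] pos h0 hn (by simp)
    rw [nlScan]
    by_cases hi : PySem.Chars.findFrom cs ['\n'] pos = -1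
    · simp only [hi, reduceIte]
      refine ⟨(cs.length : Int), by simp, hn, le_refl _, Or.inl rfl, ?_⟩
      intro k hks _ hm
      exact hfneg hi k hks ((matchAt_iff cs k).mp hm).1
    · obtain ⟨his, hil, hipre, himin⟩ := hfpos hi
      set i := PySem.Chars.findFrom cs ['\n'] pos with hidef
      simp only [if_neg hi]
      by_cases hm : (heTails.any (fun t => PySem.Chars.startswith (cs.drop (i.toNat + 1)) t)) = true
      · rw [if_pos hm]
        refine ⟨i, rfl, his, by omega,
          Or.inr ((matchAt_iff cs i.toNat).mpr ⟨hipre, hm⟩), ?_⟩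
        intro k hks hki hmk
        exact himin k hks hki ((matchAt_iff cs k).mp hmk).1
      · rw [if_neg hm]
        obtain ⟨m, hres, hm1, hm2, hm3, hm4⟩ := ih (i + 1) (by omega) (by omega) (by omega)
        refine ⟨m, hres, by omega, hm2, hm3, ?_⟩
        intro k hks hki hmk
        rcases lt_trichotomy ((k : Int)) i with hk | hk | hk
        · exact himin k hks hk ((matchAt_iff cs k).mp hmk).1
        · apply hm
          have hknat : k = i.toNat := by omega
          obtain ⟨-, h2⟩ := (matchAt_iff cs k).mp hmk
          rwa [hknat] at h2
        · exact hm4 k (by omega) hki hmk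

-- the two characterisations pin the same index
lemma cut_unique (cs : List Char) (start e m : Int) (h0 : 0 ≤ start)
    (he1 : start ≤ e) (he2 : e ≤ (cs.length : Int))
    (he3 : e = (cs.length : Int) ∨ matchAt cs e.toNat)
    (he4 : ∀ k : Nat, start ≤ (k : Int) → (k : Int) < e → ¬ matchAt cs k)
    (hm1 : start ≤ m) (hm2 : m ≤ (cs.length : Int))
    (hm3 : m = (cs.length : Int) ∨ matchAt cs m.toNat)
    (hm4 : ∀ k : Nat, start ≤ (k : Int) → (k : Int) < m → ¬ matchAt cs k) : e = m := by
  rcases lt_trichotomy e m with h | h | h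
  · exfalso
    have hme : matchAt cs e.toNat := by
      rcases he3 with h' | h'
      · exfalso; omega
      · exact h'
    exact hm4 e.toNat (by omega) (by omega) hme
  · exact h
  · exfalso
    have hmm : matchAt cs m.toNat := by
      rcases hm3 with h' | h'
      · exfalso; omega
      · exact h'
    exact he4 m.toNat (by omega) (by omega) hmm

-- A's fold, characterised with matchAt-minimality for any valid start
lemma fold_full (cs : List Char) (start : Int) (h0 : 0 ≤ start) (hn : start ≤ (cs.length : Int)) :
    start ≤ heStops.foldl (fstep cs start) ((cs.length : Int)) ∧
    heStops.foldl (fstep cs start) ((cs.length : Int)) ≤ (cs.length : Int) ∧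
    (heStops.foldl (fstep cs start) ((cs.length : Int)) = (cs.length : Int) ∨
      matchAt cs (heStops.foldl (fstep cs start) ((cs.length : Int))).toNat) ∧
    (∀ k : Nat, start ≤ (k : Int) →
      (k : Int) < heStops.foldl (fstep cs start) ((cs.length : Int)) → ¬ matchAt cs k) := by
  obtain ⟨a1, a2, a3, a4⟩ := fold_spec cs start h0 hn heStops (fun p hp => hp)
    ((cs.length : Int)) hn (le_refl _) (Or.inl rfl)
  refine ⟨a1, a2, a3, ?_⟩
  rintro k hks hki ⟨p, hp, hpre⟩
  exact a4 p hp k hks hki hpre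

lemma main_eq (cs : List Char) (start : Int) (h0 : 0 ≤ start) (hn : start ≤ (cs.length : Int)) :
    String.ofList (PySem.List.slice cs none
        (some (heStops.foldl (fstep cs start) ((cs.length : Int))))) =
    String.ofList (nlScan cs start (cs.length + 1)) := by
  obtain ⟨a1, a2, a3, a4⟩ := fold_full cs start h0 hn
  obtain ⟨m, hres, hm1, hm2, hm3, hm4⟩ := nlScan_spec cs (cs.length + 1) start h0 hn (by omega)
  have he : heStops.foldl (fstep cs start) ((cs.length : Int)) = m :=
    cut_unique cs start _ m h0 a1 a2 a3 a4 hm1 hm2 hm3 hm4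
  rw [he, hres, PySem.List.slice_to _ (by omega)]

-- A's startswith-on-stripped test equals B's take-prefix test
lemma cond_iff (cs : List Char) :
    (PySem.Chars.startswith (lstripNlSp cs) "def ".toList ||
     PySem.Chars.startswith (lstripNlSp cs) "class ".toList) = true ↔
    ((cs.dropWhile (fun c => c == '\n' || c == ' ')).take 4 = "def ".toList ∨
     (cs.dropWhile (fun c => c == '\n' || c == ' ')).take 6 = "class ".toList) := by
  simp only [Bool.or_eq_true, PySem.Chars.startswith_iff, lstripNlSp]
  constructor
  · rintro (h | h) <;> [left; right] <;>
      simpa using (List.prefix_iff_eq_take.mp h).symm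
  · rintro (h | h) <;> [left; right] <;>
      · rw [List.prefix_iff_eq_take]
        simpa using h.symm

-- ===== VERDICT (by name: the statement is the Claim_ definition above) =====
theorem truncate_at_function_end_spec : Claim_equal_truncate_at_function_end := by
  intro s _
  unfold Spec_truncate_at_function_end truncate_at_function_end truncate_at_function_end_alt
  simp only []
  have hdw : lstripNlSp s.toList = s.toList.dropWhile (fun c => c == '\n' || c == ' ') := rfl
  set cs := s.toList with hcs
  have hlam : ∀ st : Int, (fun (e : Int) (stop : List Char) =>
      if PySem.Chars.findFrom cs stop st ≠ -1 ∧ PySem.Chars.findFrom cs stop st < e then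
        PySem.Chars.findFrom cs stop st else e) = fstep cs st := fun st => rfl
  by_cases hc : (PySem.Chars.startswith (lstripNlSp cs) "def ".toList ||
      PySem.Chars.startswith (lstripNlSp cs) "class ".toList) = true
  · have hc' := (cond_iff cs).mp hc
    have hlenstr : (lstripNlSp cs).length ≤ cs.length := List.length_dropWhile_le _ _
    have harg : ((cs.length : Int) - ((lstripNlSp cs).length : Int)) ≥ 0 := by omega
    rw [if_pos hc', bodyStart, if_pos hc]
    by_cases hnl : PySem.Chars.findFrom cs ['\n']
        ((cs.length : Int) - ((lstripNlSp cs).length : Int)) = -1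
    · -- no newline after the header: start = len, A's fold stays at len, B returns s whole
      rw [if_neg (by simp [hnl]), ← hdw, if_pos hnl, hlam]
      obtain ⟨a1, a2, -, -⟩ := fold_full cs ((cs.length : Int)) (by omega) (le_refl _)
      have hfl : heStops.foldl (fstep cs ((cs.length : Int))) ((cs.length : Int)) = (cs.length : Int) := by
        omega
      rw [hfl, PySem.List.slice_to _ (by omega)]
      simp [hcs, List.take_of_length_le]
    · obtain ⟨-, hfpos⟩ := find_spec' cs ['\n']
        ((cs.length : Int) - ((lstripNlSp cs).length : Int)) harg (by omega) (by simp)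
      obtain ⟨his, hil, -, -⟩ := hfpos hnl
      rw [if_pos (by simpa using hnl), ← hdw, if_neg hnl, hlam]
      exact main_eq cs _ (by omega) (by omega)
  · rw [if_neg (fun h => hc ((cond_iff cs).mpr h)), bodyStart, if_neg (by simpa using hc), hlam]
    exact main_eq cs 0 (by omega) (by omega)
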